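-- pv_equiv track=rewrite | github.com/spencerfrost/open-karaoke-studio | backend/app/services/musicbrainz_service.py | _extract_release_info
-- ===== SOURCE A (Python) =====
-- from typing import Dict, Any, Optional, List
--
-- def _extract_release_info(recording: Dict[str, Any]) -> Optional[Dict[str, Any]]:
--     """Extract release information from a recording."""
--     if 'release-list' not in recording or not recording['release-list']:
--         return None
--
--     # Prefer a release with country 'US', then 'GB' (UK), then 'CA' (Canada), otherwise use the first release
--     preferred_countries = ['US', 'GB', 'CA']
--     releases = recording['release-list']
--     release = next(
--         (r for country in preferred_countries for r in releases if r.get('country') == country),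
--         releases[0]
--     )
--
--     return {
--         "id": release.get('id'),
--         "title": release.get('title'),
--         "date": release.get('date')
--     }
-- ===== SOURCE B (Python) =====
-- from typing import Dict, Any, Optional, List
--
-- _RANK = {'US': 0, 'GB': 1, 'CA': 2}
--
-- def _summary(release):
--     return {
--         "id": release.get('id'),
--         "title": release.get('title'),
--         "date": release.get('date')
--     }
--
-- def _extract_release_info(recording: Dict[str, Any]) -> Optional[Dict[str, Any]]:
--     """Extract release information from a recording."""
--     releases = recording.get('release-list')
--     if not releases:
--         return None
--     # Single pass: keep the first release achieving the best (lowest) priority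
--     # rank; rank 3 = no preferred country.  Fallback is releases[0].
--     best, best_rank = releases[0], 3
--     for r in releases:
--         rank = _RANK.get(r.get('country'), 3)
--         if rank < best_rank:
--             best, best_rank = r, rank
--     return _summary(best)
-- ===== Notes on version B (the rewrite author's own statement) =====
-- stated objective: alternative
-- what changed: Replaces A's per-country priority scans (a generator iterating preferred countries x releases) by a single arg-min pass that keeps the first release achieving the lowest priority rank (US=0, GB=1, CA=2, none=3), falling back to releases[0].
import Mathlib
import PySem

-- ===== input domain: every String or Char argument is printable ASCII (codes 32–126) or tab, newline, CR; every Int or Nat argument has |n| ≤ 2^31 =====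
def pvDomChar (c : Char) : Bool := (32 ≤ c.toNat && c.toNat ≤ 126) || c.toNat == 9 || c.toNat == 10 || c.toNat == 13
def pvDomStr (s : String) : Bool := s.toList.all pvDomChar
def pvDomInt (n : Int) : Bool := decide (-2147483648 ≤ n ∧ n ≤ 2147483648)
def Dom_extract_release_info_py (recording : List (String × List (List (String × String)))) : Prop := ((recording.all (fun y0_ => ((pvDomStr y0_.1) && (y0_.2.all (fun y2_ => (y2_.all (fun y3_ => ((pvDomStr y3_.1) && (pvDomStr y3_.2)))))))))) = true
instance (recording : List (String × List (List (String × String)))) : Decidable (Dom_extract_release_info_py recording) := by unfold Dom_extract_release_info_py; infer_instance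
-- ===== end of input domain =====

-- B replaces A's per-country priority scans by one arg-min pass over a priority rank; same return value.

-- shared primitive: Python dict .get(k) on an association list (first match)
def pyGetStr (d : List (String × String)) (k : String) : Option String :=
  (d.find? (fun p => p.1 == k)).map (·.2)

def pyGetRec (d : List (String × List (List (String × String)))) (k : String) :
    Option (List (List (String × String))) :=
  (d.find? (fun p => p.1 == k)).map (·.2)

-- ===== PORT A =====
-- `next((r for country in preferred for r in releases if r.get('country') == country), releases[0])`
def firstByCountry : List String → List (List (String × String)) → Option (List (String × String))
  | [], _ => none
  | c :: cs, releases =>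
    match releases.find? (fun r => pyGetStr r "country" == some c) with
    | some r => some r
    | none => firstByCountry cs releases

def extract_release_info_py (recording : List (String × List (List (String × String)))) : Option (List (String × Option String)) :=
  match pyGetRec recording "release-list" with
  | none => none
  | some [] => none
  | some (r0 :: rest) =>
    let releases := r0 :: rest
    let release := (firstByCountry ["US", "GB", "CA"] releases).getD r0
    some [("id", pyGetStr release "id"), ("title", pyGetStr release "title"), ("date", pyGetStr release "date")]

-- ===== PORT B =====
-- _RANK = {'US': 0, 'GB': 1, 'CA': 2}
def pvRankDict : PySem.Dict String Int := PySem.Dict.ofList [("US", 0), ("GB", 1), ("CA", 2)]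

-- _RANK.get(country, 3): a missing key (including country None) gives 3
def rankOf (c : Option String) : Int :=
  match c with
  | none => 3
  | some s => pvRankDict.getD s 3

-- _summary(release)
def summaryOf (release : List (String × String)) : List (String × Option String) :=
  [("id", pyGetStr release "id"), ("title", pyGetStr release "title"), ("date", pyGetStr release "date")]

-- the loop body: keep the first release achieving the lowest rank
def bestStep (st : List (String × String) × Int) (r : List (String × String)) :
    List (String × String) × Int :=
  if rankOf (pyGetStr r "country") < st.2 then (r, rankOf (pyGetStr r "country")) else st

def extract_release_info_py_alt (recording : List (String × List (List (String × String)))) : Option (List (String × Option String)) :=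
  match pyGetRec recording "release-list" with
  | some (r0 :: rest) => some (summaryOf ((r0 :: rest).foldl bestStep (r0, 3)).1)
  | _ => none

-- ===== PRECONDITION & SPEC =====
def Spec_extract_release_info_py (recording : List (String × List (List (String × String)))) (out : Option (List (String × Option String))) : Prop := out = extract_release_info_py_alt recording
instance (recording : List (String × List (List (String × String)))) (out : Option (List (String × Option String))) : Decidable (Spec_extract_release_info_py recording out) := by unfold Spec_extract_release_info_py; infer_instance

-- ===== CLAIM (what is proved, stated in full; the proofs are below) =====
def Claim_equal_extract_release_info_py : Prop := ∀ (recording : List (String × List (List (String × String)))), Dom_extract_release_info_py recording → Spec_extract_release_info_py recording (extract_release_info_py recording)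

-- ===== LEMMAS AND PROOFS =====

-- the priority-country prefix a rank bound k admits
def pfx (k : Int) : List String :=
  if k ≤ 0 then [] else if k = 1 then ["US"] else if k = 2 then ["US", "GB"] else ["US", "GB", "CA"]

theorem rank_other (s : String) (h1 : s ≠ "US") (h2 : s ≠ "GB") (h3 : s ≠ "CA") :
    rankOf (some s) = 3 := by
  have hm : pvRankDict = PySem.Dict.mk [("US", 0), ("GB", 1), ("CA", 2)] := by decide
  simp [rankOf, hm, PySem.Dict.getD, Ne.symm h1, Ne.symm h2, Ne.symm h3, PySem.Dict.get?]

theorem rank_mem (c : Option String) : rankOf c = 0 ∨ rankOf c = 1 ∨ rankOf c = 2 ∨ rankOf c = 3 := by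
  cases c with
  | none => right; right; right; rfl
  | some s =>
    by_cases h1 : s = "US"
    · subst h1; left; decide
    by_cases h2 : s = "GB"
    · subst h2; right; left; decide
    by_cases h3 : s = "CA"
    · subst h3; right; right; left; decide
    right; right; right; exact rank_other s h1 h2 h3

theorem fbc_nil (cs : List String) : firstByCountry cs [] = none := by
  induction cs with
  | nil => rfl
  | cons c cs ih => simp [firstByCountry, ih]

theorem sel_cons (k : Int) (hk0 : 0 ≤ k) (hk : k ≤ 3) (r : List (String × String))
    (rest : List (List (String × String))) :
    firstByCountry (pfx k) (r :: rest)
      = if rankOf (pyGetStr r "country") < k then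
          match firstByCountry (pfx (rankOf (pyGetStr r "country"))) rest with
          | some x => some x
          | none => some r
        else firstByCountry (pfx k) rest := by
  cases hc : pyGetStr r "country" with
  | none =>
    rw [show rankOf none = (3 : Int) from rfl, if_neg (by omega)]
    interval_cases k <;> simp [pfx, firstByCountry, List.find?_cons, hc]
  | some s =>
    by_cases h1 : s = "US"
    · subst h1
      rw [show rankOf (some "US") = (0 : Int) from by decide]
      interval_cases k <;> simp [pfx, firstByCountry, List.find?_cons, hc, fbc_nil]
    by_cases h2 : s = "GB"
    · subst h2
      rw [show rankOf (some "GB") = (1 : Int) from by decide]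
      interval_cases k <;>
        simp [pfx, firstByCountry, List.find?_cons, hc, h1] <;>
        (try cases hf : List.find? (fun r => pyGetStr r "country" == some "US") rest <;> simp [hf])
    by_cases h3 : s = "CA"
    · subst h3
      rw [show rankOf (some "CA") = (2 : Int) from by decide]
      interval_cases k <;>
        (try simp [pfx, firstByCountry, List.find?_cons, hc, h1, h2]) <;>
        (try cases hf : List.find? (fun r => pyGetStr r "country" == some "US") rest <;> simp [hf]) <;>
        (try cases hg : List.find? (fun r => pyGetStr r "country" == some "GB") rest <;> simp [hg])
    rw [rank_other s h1 h2 h3, if_neg (by omega)]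
    interval_cases k <;> simp [pfx, firstByCountry, List.find?_cons, hc, h1, h2, h3]

theorem fold_sel (l : List (List (String × String))) (b : List (String × String)) (k : Int)
    (hk0 : 0 ≤ k) (hk : k ≤ 3) :
    l.foldl bestStep (b, k)
      = match firstByCountry (pfx k) l with
        | some x => (x, rankOf (pyGetStr x "country"))
        | none => (b, k) := by
  induction l generalizing b k with
  | nil => simp [fbc_nil]
  | cons r rest ih =>
    rw [List.foldl_cons, sel_cons k hk0 hk r rest]
    have hb := rank_mem (pyGetStr r "country")
    by_cases hlt : rankOf (pyGetStr r "country") < k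
    · rw [if_pos hlt]
      have hs : bestStep (b, k) r = (r, rankOf (pyGetStr r "country")) := by
        simp [bestStep, hlt]
      rw [hs, ih _ _ (by rcases hb with h | h | h | h <;> omega)
            (by rcases hb with h | h | h | h <;> omega)]
      cases h' : firstByCountry (pfx (rankOf (pyGetStr r "country"))) rest <;> simp [h']
    · rw [if_neg hlt]
      have hs : bestStep (b, k) r = (b, k) := by simp [bestStep, hlt]
      rw [hs, ih _ _ hk0 hk]

-- ===== VERDICT (by name: the statement is the Claim_ definition above) =====
theorem extract_release_info_py_spec : Claim_equal_extract_release_info_py := by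
  intro recording _
  unfold Spec_extract_release_info_py extract_release_info_py extract_release_info_py_alt
  cases h : pyGetRec recording "release-list" with
  | none => rfl
  | some rel =>
    cases rel with
    | nil => rfl
    | cons r0 rest =>
      have h3 : pfx 3 = ["US", "GB", "CA"] := rfl
      have := fold_sel (r0 :: rest) r0 3 (by norm_num) le_rfl
      rw [h3] at this
      simp only [this, summaryOf]
      cases firstByCountry ["US", "GB", "CA"] (r0 :: rest) <;> rfl
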